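-- pv_equiv track=rewrite | github.com/johnfontaine/chess-notebooks | chess_analysis/engine_cache.py | _analyze_move_consistency
-- ===== SOURCE A (Python) =====
-- from typing import Optional
--
-- def _analyze_move_consistency(
--
--     depths: list[int],
--     best_moves: dict[int, str],
-- ) -> tuple[bool, Optional[int], int]:
--     """Analyze how consistent the best move is across depths."""
--     sorted_depths = sorted(depths)
--     if not sorted_depths or not best_moves:
--         return True, None, 0
--
--     changes = 0
--     first_consistent = None
--     prev_move = None
--     final_move = best_moves.get(sorted_depths[-1])
--
--     for depth in sorted_depths:
--         move = best_moves.get(depth)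
--         if move is None:
--             continue
--
--         if prev_move is not None and move != prev_move:
--             changes += 1
--
--         if first_consistent is None and move == final_move:
--             first_consistent = depth
--         elif move != final_move:
--             first_consistent = None
--
--         prev_move = move
--
--     if first_consistent is None and final_move is not None:
--         first_consistent = sorted_depths[-1]
--
--     return changes == 0, first_consistent, changes
-- ===== SOURCE B (Python) =====
-- from typing import Optional
--
--
-- def _analyze_move_consistency(
--     depths: list[int],
--     best_moves: dict[int, str],
-- ) -> tuple[bool, Optional[int], int]:
--     """Analyze how consistent the best move is across depths (reverse-scan decomposition)."""
--     if not depths or not best_moves: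
--         return True, None, 0
--
--     sorted_depths = sorted(depths)
--     final_move = best_moves.get(sorted_depths[-1])
--
--     moves = [m for m in (best_moves.get(d) for d in sorted_depths) if m is not None]
--     changes = sum(1 for a, b in zip(moves, moves[1:]) if a != b)
--
--     first_consistent = None
--     for d in reversed(sorted_depths):
--         m = best_moves.get(d)
--         if m is None:
--             continue
--         if m == final_move:
--             first_consistent = d
--         else:
--             break
--
--     return changes == 0, first_consistent, changes
-- ===== Notes on version B (the rewrite author's own statement) =====
-- stated objective: alternative
-- what changed: Replaces A's single forward fold carrying (changes, first_consistent, prev_move) with three independent computations: changes as the count of adjacent unequal pairs in the non-None move sequence, and first_consistent by a reverse scan that stops at the first move differing from the final move (making A's trailing fallback unnecessary).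
import Mathlib
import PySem

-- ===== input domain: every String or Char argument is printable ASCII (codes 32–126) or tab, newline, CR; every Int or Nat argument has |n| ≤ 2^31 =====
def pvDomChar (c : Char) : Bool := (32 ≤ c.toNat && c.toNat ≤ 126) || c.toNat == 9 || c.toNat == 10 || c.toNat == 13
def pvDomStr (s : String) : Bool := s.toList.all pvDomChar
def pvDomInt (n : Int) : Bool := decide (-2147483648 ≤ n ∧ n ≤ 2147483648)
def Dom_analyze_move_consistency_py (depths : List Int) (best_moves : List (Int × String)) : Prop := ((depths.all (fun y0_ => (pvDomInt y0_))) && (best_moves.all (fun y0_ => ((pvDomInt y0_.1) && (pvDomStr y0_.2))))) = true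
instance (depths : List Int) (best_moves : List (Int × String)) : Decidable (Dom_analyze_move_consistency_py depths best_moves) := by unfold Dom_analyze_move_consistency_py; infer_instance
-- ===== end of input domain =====

-- B restructures A's single stateful forward loop into independent passes (adjacent-pair count + reverse scan); equivalence of the return value is proved on all inputs.

-- ===== PORT A =====
-- loop body of A's single for-loop; state = (changes, first_consistent, prev_move)
def mcStep (bm : List (Int × String)) (f : Option String)
    (st : Int × Option Int × Option String) (depth : Int) : Int × Option Int × Option String :=
  match List.lookup depth bm with
  | none => st
  | some move =>
      let changes := if st.2.2 ≠ none ∧ some move ≠ st.2.2 then st.1 + 1 else st.1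
      let fc := if st.2.1 = none ∧ some move = f then some depth
                else if some move ≠ f then none else st.2.1
      (changes, fc, some move)

def analyze_move_consistency_py (depths : List Int) (best_moves : List (Int × String)) : Bool × Option Int × Int :=
  let sorted_depths := PySem.List.sorted depths (fun x => x) false
  if sorted_depths = [] ∨ best_moves = [] then (true, none, 0)
  else
    let final_move := List.lookup ((PySem.List.pyGet? sorted_depths (-1)).getD 0) best_moves
    let r := sorted_depths.foldl (mcStep best_moves final_move) (0, none, none)
    let fc := if r.2.1 = none ∧ final_move ≠ none then PySem.List.pyGet? sorted_depths (-1) else r.2.1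
    (r.1 == 0, fc, r.1)

-- ===== PORT B =====
-- B's reverse scan: skip None moves, remember the depth while moves equal the final move, stop at the first differing move
def mcRevScan (bm : List (Int × String)) (f : Option String) : List Int → Option Int → Option Int
  | [], fc => fc
  | d :: rest, fc =>
      match List.lookup d bm with
      | none => mcRevScan bm f rest fc
      | some m => if some m = f then mcRevScan bm f rest (some d) else fc

def analyze_move_consistency_py_alt (depths : List Int) (best_moves : List (Int × String)) : Bool × Option Int × Int :=
  if depths = [] ∨ best_moves = [] then (true, none, 0)
  else
    let sorted_depths := PySem.List.sorted depths (fun x => x) false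
    let final_move := List.lookup ((PySem.List.pyGet? sorted_depths (-1)).getD 0) best_moves
    let moves := sorted_depths.filterMap (fun d => List.lookup d best_moves)
    let changes : Int := ((moves.zip moves.tail).filter (fun p => p.1 != p.2)).length
    (changes == 0, mcRevScan best_moves final_move sorted_depths.reverse none, changes)

-- ===== PRECONDITION & SPEC =====
def Spec_analyze_move_consistency_py (depths : List Int) (best_moves : List (Int × String)) (out : Bool × Option Int × Int) : Prop := out = analyze_move_consistency_py_alt depths best_moves
instance (depths : List Int) (best_moves : List (Int × String)) (out : Bool × Option Int × Int) : Decidable (Spec_analyze_move_consistency_py depths best_moves out) := by unfold Spec_analyze_move_consistency_py; infer_instance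

-- ===== CLAIM (what is proved, stated in full; the proofs are below) =====
def Claim_equal_analyze_move_consistency_py : Prop := ∀ (depths : List Int) (best_moves : List (Int × String)), Dom_analyze_move_consistency_py depths best_moves → Spec_analyze_move_consistency_py depths best_moves (analyze_move_consistency_py depths best_moves)

-- ===== LEMMAS AND PROOFS =====

-- count of adjacent unequal pairs, as B computes it
def zc (l : List String) : Nat := ((l.zip l.tail).filter (fun p => p.1 != p.2)).length

theorem zc_cons_cons (a b : String) (l : List String) :
    zc (a :: b :: l) = (if a = b then 0 else 1) + zc (b :: l) := by
  by_cases h : a = b <;> simp [zc, h] <;> omega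

theorem zc_append (l : List String) (m : String) :
    zc (l ++ [m]) = zc l + (match l.getLast? with | none => 0 | some p => if p = m then 0 else 1) := by
  induction l with
  | nil => simp [zc]
  | cons a t ih =>
    cases t with
    | nil => simp [zc]; by_cases h : a = m <;> simp [h]
    | cons b t' =>
      rw [List.cons_append, List.cons_append, zc_cons_cons, ← List.cons_append, ih,
        zc_cons_cons, List.getLast?_cons_cons]
      cases hl : (b :: t').getLast? with
      | none => simp at hl
      | some p =>
        by_cases hpm : p = m
        · simp [hpm]
        · simp [hpm]
          omega

theorem mcRevScan_acc (bm : List (Int × String)) (f : Option String) (l : List Int) (a : Option Int) :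
    mcRevScan bm f l a = (mcRevScan bm f l none).or a := by
  induction l generalizing a with
  | nil => simp [mcRevScan]
  | cons d rest ih =>
    simp only [mcRevScan]
    cases h : List.lookup d bm with
    | none => exact ih a
    | some m =>
      by_cases hm : some m = f
      · simp only [hm, if_pos rfl, ih (some d)]
        cases mcRevScan bm f rest none <;> simp
      · simp [hm]

theorem mc_invariant (bm : List (Int × String)) (f : Option String) (s : List Int) :
    s.foldl (mcStep bm f) (0, none, none) =
      ((zc (s.filterMap (fun d => List.lookup d bm)) : Int),
       mcRevScan bm f s.reverse none,
       (s.filterMap (fun d => List.lookup d bm)).getLast?) := by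
  induction s using List.reverseRecOn with
  | nil => simp [zc, mcRevScan]
  | append_singleton t d ih =>
    rw [List.foldl_append, ih]
    simp only [List.foldl_cons, List.foldl_nil, mcStep, List.filterMap_append,
      List.reverse_append, List.reverse_cons, List.reverse_nil, List.nil_append,
      List.cons_append, mcRevScan]
    cases h : List.lookup d bm with
    | none => simp [h]
    | some m =>
      simp only [h, List.filterMap_cons, List.filterMap_nil]
      refine Prod.ext ?_ (Prod.ext ?_ ?_) <;> simp only
      · rw [zc_append]
        cases hl : (t.filterMap (fun d => List.lookup d bm)).getLast? with
        | none => simp [hl]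
        | some p =>
          simp only [hl]
          by_cases hpm : p = m
          · simp [hpm]
          · simp [hpm]
            exact fun hc => hpm hc.symm
      · by_cases hm : some m = f
        · rw [if_pos hm, mcRevScan_acc bm f t.reverse (some d)]
          cases hr : mcRevScan bm f t.reverse none <;> simp [hr, hm]
        · simp [hm]
      · simp

theorem sorted_ne_nil_of_ne_nil (depths : List Int) (h : depths ≠ []) :
    PySem.List.sorted depths (fun x => x) false ≠ [] := by
  intro hc
  have := PySem.List.length_sorted depths (fun x => x) false
  rw [hc] at this
  exact h (List.eq_nil_of_length_eq_zero this.symm)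

-- ===== VERDICT (by name: the statement is the Claim_ definition above) =====
theorem analyze_move_consistency_py_spec : Claim_equal_analyze_move_consistency_py := by
  intro depths best_moves _
  unfold Spec_analyze_move_consistency_py analyze_move_consistency_py analyze_move_consistency_py_alt
  by_cases hd : depths = []
  · subst hd; simp [PySem.List.sorted]
  · by_cases hb : best_moves = []
    · simp [hb, sorted_ne_nil_of_ne_nil depths hd]
    · have hs := sorted_ne_nil_of_ne_nil depths hd
      simp only [hs, hb, hd, or_self, if_neg, if_false, or_false, false_or]
      rw [mc_invariant]
      set sd := PySem.List.sorted depths (fun x => x) false with hsd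
      obtain ⟨lst, hlst⟩ : ∃ l, sd.getLast? = some l := by
        cases h : sd.getLast? with
        | none => exact absurd (List.getLast?_eq_none_iff.mp h) hs
        | some l => exact ⟨l, rfl⟩
      have hneg : PySem.List.pyGet? sd (-1) = some lst := by
        rw [PySem.List.pyGet?_neg_one, hlst]
      set f := List.lookup ((PySem.List.pyGet? sd (-1)).getD 0) best_moves with hf
      have hno : ¬ (mcRevScan best_moves f sd.reverse none = none ∧ f ≠ none) := by
        rintro ⟨h1, h2⟩
        cases hfo : f with
        | none => exact h2 hfo
        | some mv =>
          obtain ⟨rest, hrest⟩ : ∃ rest, sd.reverse = lst :: rest := by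
            cases hr : sd.reverse with
            | nil => exact absurd (by simpa using congrArg List.reverse hr) hs
            | cons x xs =>
              refine ⟨xs, ?_⟩
              have hx : sd.getLast? = some x := by
                rw [← List.head?_reverse, hr]; rfl
              rw [hlst] at hx; injection hx with h'
              rw [h']
          have hlook : List.lookup lst best_moves = some mv := by
            rw [hf, hneg] at hfo; simpa using hfo
          rw [hrest] at h1
          simp only [mcRevScan, hlook, hfo, if_pos rfl] at h1
          rw [mcRevScan_acc] at h1
          cases mcRevScan best_moves f rest none <;> simp [hfo] at h1
      rw [if_neg hno]
      rfl
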